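-- pv_equiv track=rewrite | github.com/mquevill/poltype | PoltypeModules/databaseparser.py | CountRings
-- ===== SOURCE A (Python) =====
-- def CountRings(poltype,smartsfortransfer):
--     counts=0
--     for idx in range(len(smartsfortransfer)):
--         e=smartsfortransfer[idx]
--         if e=='1':
--             preve=smartsfortransfer[idx-1]
--             if preve!='#':
--                 counts+=1
--     return counts
-- ===== SOURCE B (Python) =====
-- def CountRings(poltype, smartsfortransfer):
--     return smartsfortransfer.count('1') - smartsfortransfer.count('#1')
-- ===== Notes on version B (the rewrite author's own statement) =====
-- stated objective: simpler
-- what changed: Replaces the Python-level indexed scan with wrap-around predecessor lookup by the aggregate formula s.count('1') - s.count('#1') (C-level string scans).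
-- intended difference: On strings whose first character is '1' and last character is '#', A's negative-index wraparound treats the last char as the predecessor of position 0 and skips that leading '1', while B counts it; a leading '1' has no preceding '#', so B's count is the intended one. — e.g. on CountRings("", "1#"): A returns 0, B returns 1
import Mathlib
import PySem

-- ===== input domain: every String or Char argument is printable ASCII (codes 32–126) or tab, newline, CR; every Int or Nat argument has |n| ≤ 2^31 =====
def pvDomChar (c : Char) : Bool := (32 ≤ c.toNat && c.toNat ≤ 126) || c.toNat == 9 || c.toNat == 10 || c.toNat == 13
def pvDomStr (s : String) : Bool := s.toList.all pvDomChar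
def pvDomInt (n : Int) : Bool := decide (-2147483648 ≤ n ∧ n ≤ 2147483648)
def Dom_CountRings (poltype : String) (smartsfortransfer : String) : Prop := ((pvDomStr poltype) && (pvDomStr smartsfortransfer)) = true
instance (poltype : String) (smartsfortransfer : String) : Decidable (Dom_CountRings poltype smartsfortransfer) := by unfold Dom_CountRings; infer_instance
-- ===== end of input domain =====

-- B replaces A's indexed scan (with its s[idx-1] wraparound at idx 0) by the aggregate
-- formula s.count('1') - s.count('#1'); simpler, and intentionally different (D_) where
-- A's wraparound skips a leading '1'.

-- ===== PORT A =====
def CountRings (poltype : String) (smartsfortransfer : String) : Int :=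
  (PySem.List.pyRange 0 (PySem.Str.len smartsfortransfer) 1).foldl
    (fun counts idx =>
      let e := PySem.List.pyGetD smartsfortransfer.toList idx ' '
      if e = '1' then
        let preve := PySem.List.pyGetD smartsfortransfer.toList (idx - 1) ' '
        if preve ≠ '#' then counts + 1 else counts
      else counts) 0

-- ===== PORT B =====
def CountRings_alt (poltype : String) (smartsfortransfer : String) : Int :=
  (PySem.Str.count smartsfortransfer "1" : Int) - (PySem.Str.count smartsfortransfer "#1" : Int)

-- ===== PRECONDITION & SPEC =====
-- On strings starting with '1' and ending with '#', A's idx-1 wraparound makes the last char the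
-- predecessor of position 0 and skips the leading '1'; B counts it, which is the intended value
-- since a leading '1' has no preceding '#'.
def D_CountRings (poltype : String) (smartsfortransfer : String) : Prop :=
  smartsfortransfer.toList.head? = some '1' ∧ smartsfortransfer.toList.getLast? = some '#'
instance (poltype : String) (smartsfortransfer : String) : Decidable (D_CountRings poltype smartsfortransfer) := by unfold D_CountRings; infer_instance

def Spec_CountRings (poltype : String) (smartsfortransfer : String) (out : Int) : Prop :=
  ¬ D_CountRings poltype smartsfortransfer → out = CountRings_alt poltype smartsfortransfer
instance (poltype : String) (smartsfortransfer : String) (out : Int) : Decidable (Spec_CountRings poltype smartsfortransfer out) := by unfold Spec_CountRings; infer_instance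

def pvDiffWitness_CountRings : String × String := ("", "1#")
def pvDiffWitnessOut_CountRings : Int × Int := (0, 1)

-- ===== CLAIM (what is proved, stated in full; the proofs are below) =====
def Claim_unchanged_CountRings : Prop := ∀ (poltype : String) (smartsfortransfer : String), Dom_CountRings poltype smartsfortransfer → Spec_CountRings poltype smartsfortransfer (CountRings poltype smartsfortransfer)
def Claim_changed_CountRings : Prop := Dom_CountRings (pvDiffWitness_CountRings.1) (pvDiffWitness_CountRings.2) ∧ D_CountRings (pvDiffWitness_CountRings.1) (pvDiffWitness_CountRings.2) ∧ CountRings (pvDiffWitness_CountRings.1) (pvDiffWitness_CountRings.2) = pvDiffWitnessOut_CountRings.1 ∧ CountRings_alt (pvDiffWitness_CountRings.1) (pvDiffWitness_CountRings.2) = pvDiffWitnessOut_CountRings.2 ∧ pvDiffWitnessOut_CountRings.1 ≠ pvDiffWitnessOut_CountRings.2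
def Claim_exact_CountRings : Prop := ∀ (poltype : String) (smartsfortransfer : String), Dom_CountRings poltype smartsfortransfer → D_CountRings poltype smartsfortransfer → CountRings poltype smartsfortransfer ≠ CountRings_alt poltype smartsfortransfer

-- ===== LEMMAS AND PROOFS =====

-- number of adjacent pairs with second = '1' and first ≠ '#' (A's idx ≥ 1 terms)
def pvAdj : List Char → Int
  | a :: b :: t => (if b = '1' ∧ a ≠ '#' then 1 else 0) + pvAdj (b :: t)
  | _ => 0

-- number of adjacent pairs ('#','1') (occurrences of "#1")
def pvHash : List Char → Nat
  | a :: b :: t => (if a = '#' ∧ b = '1' then 1 else 0) + pvHash (b :: t)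
  | _ => 0

lemma pvAdj_short (l : List Char) (h : l.length ≤ 1) : pvAdj l = 0 := by
  match l with
  | [] => rfl
  | [a] => rfl
  | a :: b :: t => simp at h

lemma pvHash_cons_ne (a : Char) (t : List Char) (ha : a ≠ '#') : pvHash (a :: t) = pvHash t := by
  match t with
  | [] => rfl
  | b :: t' => simp [pvHash, ha]

-- A's loop over idx ∈ [i, n) with i ≥ 1 counts exactly the adjacent pairs of l.drop (i-1)
lemma pvLoopA (l : List Char) :
    ∀ (k : Nat) (i : Nat) (acc : Int), 1 ≤ i → l.length - i ≤ k →
      (PySem.List.pyRange (i : Int) (l.length : Int) 1).foldl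
        (fun counts idx =>
          let e := PySem.List.pyGetD l idx ' '
          if e = '1' then
            let preve := PySem.List.pyGetD l (idx - 1) ' '
            if preve ≠ '#' then counts + 1 else counts
          else counts) acc
      = acc + pvAdj (l.drop (i - 1)) := by
  intro k
  induction k with
  | zero =>
    intro i acc hi hk
    have hni : l.length ≤ i := by omega
    rw [PySem.List.pyRange_one_eq_nil (by exact_mod_cast hni)]
    have : (l.drop (i - 1)).length ≤ 1 := by
      simp [List.length_drop]; omega
    simp [pvAdj_short _ this]
  | succ k ih =>
    intro i acc hi hk
    by_cases hin : i < l.length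
    · rw [PySem.List.pyRange_one_cons (by exact_mod_cast hin)]
      simp only [List.foldl_cons]
      have hstep : ((i : Int) + 1) = ((i + 1 : Nat) : Int) := by push_cast; ring
      have hsub : ((i : Int) - 1) = ((i - 1 : Nat) : Int) := by omega
      rw [hstep, hsub, ih (i + 1) _ (by omega) (by omega)]
      simp only [Nat.add_sub_cancel, PySem.List.pyGetD_natCast]
      have hdrop1 : List.drop (i - 1) l = l.getD (i - 1) ' ' :: List.drop i l := by
        have h1 : (i - 1) + 1 = i := by omega
        rw [List.getD_eq_getElem l _ (show i - 1 < l.length by omega),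
            List.drop_eq_getElem_cons (show i - 1 < l.length by omega), h1]
      have hdrop2 : List.drop i l = l.getD i ' ' :: List.drop (i + 1) l := by
        rw [List.getD_eq_getElem l _ hin]
        exact List.drop_eq_getElem_cons hin
      rw [hdrop1, hdrop2]
      simp only [pvAdj]
      generalize pvAdj (l.getD i ' ' :: List.drop (i + 1) l) = P
      split_ifs <;> first | omega | tauto
    · have hni : l.length ≤ i := by omega
      rw [PySem.List.pyRange_one_eq_nil (by exact_mod_cast hni)]
      have : (l.drop (i - 1)).length ≤ 1 := by
        simp [List.length_drop]; omega
      simp [pvAdj_short _ this]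

-- count.go for the single-character needle "1" is the character count
lemma pvGo1 : ∀ (fuel : Nat) (l : List Char) (acc : Nat), l.length ≤ fuel →
    PySem.Chars.count.go ['1'] fuel l acc = acc + l.count '1' := by
  intro fuel
  induction fuel with
  | zero =>
    intro l acc h
    have : l = [] := List.length_eq_zero_iff.mp (by omega)
    subst this; simp [PySem.Chars.count.go]
  | succ fuel ih =>
    intro l acc h
    match l with
    | [] => simp [PySem.Chars.count.go]
    | a :: t =>
      rw [PySem.Chars.count.go]
      by_cases ha : a = '1'
      · subst ha
        simp only [List.isPrefixOf, BEq.rfl, Bool.true_and, if_true]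
        rw [show List.drop ['1'].length ('1' :: t) = t from rfl,
            ih t (acc + 1) (by simpa using h)]
        simp
        omega
      · have hpre : ['1'].isPrefixOf (a :: t) = false := by
          simp [List.isPrefixOf]
          exact fun hc => absurd hc.symm ha
        rw [hpre]
        simp only [if_false, Bool.false_eq_true]
        rw [ih t acc (by simpa using h)]
        simp [ha]

-- count.go for the needle "#1" counts the adjacent ('#','1') pairs
lemma pvGo2 : ∀ (fuel : Nat) (l : List Char) (acc : Nat), l.length ≤ fuel →
    PySem.Chars.count.go ['#', '1'] fuel l acc = acc + pvHash l := by
  intro fuel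
  induction fuel with
  | zero =>
    intro l acc h
    have : l = [] := List.length_eq_zero_iff.mp (by omega)
    subst this; simp [PySem.Chars.count.go, pvHash]
  | succ fuel ih =>
    intro l acc h
    match l with
    | [] => simp [PySem.Chars.count.go, pvHash]
    | [a] =>
      rw [PySem.Chars.count.go]
      have hpre : ['#', '1'].isPrefixOf [a] = false := by
        simp [List.isPrefixOf]
      rw [hpre]
      simp only [Bool.false_eq_true, if_false]
      rw [ih [] acc (by simp)]
      rfl
    | a :: b :: t =>
      rw [PySem.Chars.count.go]
      by_cases hab : a = '#' ∧ b = '1'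
      · obtain ⟨ha, hb⟩ := hab; subst ha; subst hb
        simp only [List.isPrefixOf, BEq.rfl, Bool.true_and, if_true]
        rw [show List.drop ['#', '1'].length ('#' :: '1' :: t) = t from rfl,
            ih t (acc + 1) (by simp at h ⊢; omega)]
        have h1 : ('1' : Char) ≠ '#' := by decide
        simp [pvHash, pvHash_cons_ne '1' t h1]
        omega
      · have hpre : ['#', '1'].isPrefixOf (a :: b :: t) = false := by
          simp [List.isPrefixOf]
          intro ha hb
          exact absurd ⟨ha.symm, hb.symm⟩ hab
        rw [hpre]
        simp only [if_false, Bool.false_eq_true]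
        rw [ih (b :: t) acc (by simp at h ⊢; omega)]
        simp [pvHash, hab]

lemma pvB_eq (l : List Char) :
    (l.count '1' : Int) - (pvHash l : Int)
      = (if l.head? = some '1' then 1 else 0) + pvAdj l := by
  induction l with
  | nil => simp [pvHash, pvAdj]
  | cons a t ih =>
    match t with
    | [] =>
      by_cases ha : a = '1' <;> simp [pvHash, pvAdj, List.count_cons, ha]
    | b :: t' =>
      have hc : ((a :: b :: t').count '1' : Int)
          = (if a = '1' then 1 else 0) + ((b :: t').count '1' : Int) := by
        simp [List.count_cons]
        by_cases ha : a = '1' <;> simp [ha] <;> push_cast <;> ring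
      rw [hc]
      simp only [pvHash, pvAdj, List.head?_cons]
      have ihx : ((b :: t').count '1' : Int) - (pvHash (b :: t') : Int)
          = (if (b :: t').head? = some '1' then 1 else 0) + pvAdj (b :: t') := ih
      simp only [List.head?_cons] at ihx
      push_cast
      split_ifs at ihx ⊢ <;> simp_all <;> omega

-- B unfolded to the head-term + adjacent-pairs form
lemma pvB_closed (s : String) :
    CountRings_alt "" s
      = (if s.toList.head? = some '1' then 1 else 0) + pvAdj s.toList := by
  have h1 : PySem.Str.count s "1" = s.toList.count '1' := by
    rw [PySem.Str.count_eq]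
    show PySem.Chars.count s.toList ['1'] = _
    rw [PySem.Chars.count]
    simp only [List.isEmpty_cons, if_false, Bool.false_eq_true]
    rw [pvGo1 s.toList.length s.toList 0 le_rfl]
    omega
  have h2 : PySem.Str.count s "#1" = pvHash s.toList := by
    rw [PySem.Str.count_eq]
    show PySem.Chars.count s.toList ['#', '1'] = _
    rw [PySem.Chars.count]
    simp only [List.isEmpty_cons, if_false, Bool.false_eq_true]
    rw [pvGo2 s.toList.length s.toList 0 le_rfl]
    omega
  show (PySem.Str.count s "1" : Int) - (PySem.Str.count s "#1" : Int) = _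
  rw [h1, h2, pvB_eq]

-- A's loop at the list level
lemma pvA_list (l : List Char) :
    (PySem.List.pyRange 0 (l.length : Int) 1).foldl
        (fun counts idx =>
          let e := PySem.List.pyGetD l idx ' '
          if e = '1' then
            let preve := PySem.List.pyGetD l (idx - 1) ' '
            if preve ≠ '#' then counts + 1 else counts
          else counts) 0
      = (if l.head? = some '1' ∧ l.getLast? ≠ some '#' then 1 else 0) + pvAdj l := by
  match l with
  | [] => simp [PySem.List.pyRange_one_eq_nil, pvAdj]
  | a :: t =>
    have hne : (a :: t) ≠ [] := by simp
    have hpos : (0 : Int) < ((a :: t).length : Int) := by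
      simp
    rw [PySem.List.pyRange_one_cons hpos]
    simp only [List.foldl_cons]
    rw [show (0 : Int) + 1 = ((1 : Nat) : Int) from by norm_num]
    rw [pvLoopA (a :: t) (a :: t).length 1 _ (by omega) (by omega)]
    have h0 : PySem.List.pyGetD (a :: t) 0 ' ' = a := PySem.List.pyGetD_zero_cons a t ' '
    have hm1 : PySem.List.pyGetD (a :: t) ((0 : Int) - 1) ' ' = (a :: t).getLast hne := by
      rw [zero_sub]
      exact PySem.List.pyGetD_neg_one (a :: t) ' ' hne
    have hlast : (a :: t).getLast? = some ((a :: t).getLast hne) :=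
      List.getLast?_eq_some_getLast (h := hne)
    simp only [show (1 : Nat) - 1 = 0 from rfl, List.drop_zero]
    simp only [h0, hm1, hlast, List.head?_cons, Option.some.injEq, ne_eq]
    by_cases ha : a = '1'
    · subst ha
      by_cases hl : ('1' :: t).getLast hne = '#'
      · simp [hl]
      · simp [hl]
    · simp [ha]

-- A unfolded to its head-term + adjacent-pairs form
lemma pvA_closed (s : String) :
    CountRings "" s
      = (if s.toList.head? = some '1' ∧ s.toList.getLast? ≠ some '#' then 1 else 0)
        + pvAdj s.toList := by
  show (PySem.List.pyRange 0 (PySem.Str.len s) 1).foldl _ 0 = _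
  rw [PySem.Str.len_eq]
  exact pvA_list s.toList

-- both ports ignore poltype
lemma pvA_poltype (p s : String) : CountRings p s = CountRings "" s := rfl
lemma pvB_poltype (p s : String) : CountRings_alt p s = CountRings_alt "" s := rfl

-- ===== VERDICT (by name: the statement is the Claim_ definition above) =====
theorem CountRings_spec : Claim_unchanged_CountRings := by
  intro p s _ hD
  rw [pvA_poltype, pvB_poltype, pvA_closed, pvB_closed]
  unfold D_CountRings at hD
  by_cases hh : s.toList.head? = some '1'
  · have hl : s.toList.getLast? ≠ some '#' := fun hc => hD ⟨hh, hc⟩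
    simp [hh, hl]
  · simp [hh]

theorem CountRings_changed : Claim_changed_CountRings := by
  unfold Claim_changed_CountRings; decide

theorem CountRings_tight : Claim_exact_CountRings := by
  intro p s _ hD
  obtain ⟨hh, hl⟩ := hD
  rw [pvA_poltype, pvB_poltype, pvA_closed, pvB_closed]
  simp [hh, hl]
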